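-- pv_equiv track=rewrite | github.com/tthanh1223/datastructureAndAlgorithms | main.py | find_max_city
-- ===== SOURCE A (Python) =====
-- def find_max_city(begin, C, B):
--     count = 0
--     for index in range(len(C)):
--         begin -= C[index]
--         if begin < 0:
--             break
--         else:
--             count += 1
--             if index == len(C) - 1:
--                 return count
--             begin += B[index]
--     return count
-- ===== SOURCE B (Python) =====
-- def find_max_city(begin, C, B):
--     n = len(C)
--     # stage 1: prefix sums of costs (pc[j] = C[0] + ... + C[j-1])
--     pc = [0]
--     for c in C:
--         pc.append(pc[-1] + c)
--     # stage 2: prefix sums of the bonuses that can ever be used (B[0..n-2])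
--     pb = [0]
--     for i in range(min(n - 1, len(B))):
--         pb.append(pb[-1] + B[i])
--     # stage 3: the answer is the first index whose closed-form balance is negative
--     for j in range(n):
--         if begin - pc[j + 1] + pb[j] < 0:
--             return j
--     return n
-- ===== Notes on version B (the rewrite author's own statement) =====
-- stated objective: alternative
-- what changed: B replaces A's single-pass mutable fuel simulation by staged passes: it first materializes prefix-sum tables of costs and of usable bonuses, then a final loop evaluates the closed-form balance begin - pc[j+1] + pb[j] per index and returns the first index where it is negative (no running state in that loop).
import Mathlib
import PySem

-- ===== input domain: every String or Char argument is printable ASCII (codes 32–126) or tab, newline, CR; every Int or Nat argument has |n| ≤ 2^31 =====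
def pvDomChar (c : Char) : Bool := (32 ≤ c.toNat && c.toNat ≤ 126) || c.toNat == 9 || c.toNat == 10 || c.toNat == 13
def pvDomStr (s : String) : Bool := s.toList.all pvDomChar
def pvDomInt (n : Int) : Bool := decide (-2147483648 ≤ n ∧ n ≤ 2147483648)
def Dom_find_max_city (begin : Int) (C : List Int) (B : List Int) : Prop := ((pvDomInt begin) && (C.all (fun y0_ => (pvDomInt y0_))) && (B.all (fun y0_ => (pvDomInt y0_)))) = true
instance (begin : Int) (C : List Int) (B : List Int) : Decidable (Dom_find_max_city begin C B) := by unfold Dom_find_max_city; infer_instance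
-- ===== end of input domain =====

-- B computes precomputed prefix-sum tables of costs and bonuses in staged passes and
-- returns the first index whose closed-form balance is negative, instead of A's
-- single-pass mutable fuel simulation (objective: alternative decomposition).

-- ===== PORT A =====
-- index loop of A; `B.getD index 0` is only reached on inputs admitted by Pre_, where
-- Python's B[index] is in range, so the default 0 is never the value used there.
def goA (C : List Int) (B : List Int) : Nat → Int → Int → Int
  | index, begin, count =>
    if index < C.length then
      let begin' := begin - C.getD index 0
      if begin' < 0 then count
      else
        if index = C.length - 1 then count + 1
        else goA C B (index + 1) (begin' + B.getD index 0) (count + 1)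
    else count
  termination_by index => C.length - index
  decreasing_by omega

def find_max_city (begin : Int) (C : List Int) (B : List Int) : Int :=
  goA C B 0 begin 0

-- ===== PORT B =====
-- Source B stage 1/2: `acc = [0]; for x in xs: acc.append(acc[-1] + x)` (prefix-sum table)
def pvPrefixTable (xs : List Int) : List Int :=
  xs.foldl (fun acc x => acc ++ [acc.getLast?.getD 0 + x]) [0]

-- Source B stage 3: `for j in range(n): if begin - pc[j+1] + pb[j] < 0: return j` / `return n`;
-- the getD defaults are never the values used on inputs admitted by Pre_ (indices in range).
def scanB (begin : Int) (pc pb : List Int) (n : Nat) : Nat → Int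
  | j =>
    if j < n then
      if begin - pc.getD (j + 1) 0 + pb.getD j 0 < 0 then (j : Int)
      else scanB begin pc pb n (j + 1)
    else (n : Int)
  termination_by j => n - j
  decreasing_by omega

def find_max_city_alt (begin : Int) (C : List Int) (B : List Int) : Int :=
  let pc := pvPrefixTable C
  let pb := pvPrefixTable (B.take (min (C.length - 1) B.length))
  scanB begin pc pb C.length 0

-- ===== PRECONDITION & SPEC =====
-- Pre_ admits exactly the inputs on which Python A returns: A raises IndexError iff B is
-- shorter than len(C)-1 and every running balance up to index len(B) is still ≥ 0
-- (the balances are stated as closed-form prefix sums of the inputs).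
def Pre_find_max_city (begin : Int) (C : List Int) (B : List Int) : Prop :=
  C.length ≤ B.length + 1 ∨
    ∃ j ≤ B.length, begin - ((C.take (j + 1)).sum) + ((B.take j).sum) < 0
instance (begin : Int) (C : List Int) (B : List Int) : Decidable (Pre_find_max_city begin C B) := by unfold Pre_find_max_city; infer_instance

def pvWitness_find_max_city : Int × List Int × List Int := (10, [1, 2, 3], [1, 1])

def Spec_find_max_city (begin : Int) (C : List Int) (B : List Int) (out : Int) : Prop := out = find_max_city_alt begin C B
instance (begin : Int) (C : List Int) (B : List Int) (out : Int) : Decidable (Spec_find_max_city begin C B out) := by unfold Spec_find_max_city; infer_instance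

-- ===== CLAIM (what is proved, stated in full; the proofs are below) =====
def Claim_equal_find_max_city : Prop := ∀ (begin : Int) (C : List Int) (B : List Int), Dom_find_max_city begin C B → Pre_find_max_city begin C B → Spec_find_max_city begin C B (find_max_city begin C B)

-- ===== LEMMAS AND PROOFS =====

-- the list of partial sums of xs starting from s (without the leading s)
def pvPsums (s : Int) : List Int → List Int
  | [] => []
  | x :: xs => (s + x) :: pvPsums (s + x) xs

theorem foldl_psums (xs : List Int) : ∀ (acc : List Int) (s : Int),
    acc.getLast? = some s →
    xs.foldl (fun a x => a ++ [a.getLast?.getD 0 + x]) acc = acc ++ pvPsums s xs := by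
  induction xs with
  | nil => intro acc s _; simp [pvPsums]
  | cons x xs ih =>
    intro acc s hs
    simp only [List.foldl_cons, pvPsums, hs, Option.getD_some]
    rw [ih (acc ++ [s + x]) (s + x) (by simp), List.append_assoc]
    rfl

theorem prefixTable_eq (xs : List Int) : pvPrefixTable xs = 0 :: pvPsums 0 xs := by
  unfold pvPrefixTable
  exact foldl_psums xs [0] 0 rfl

theorem psums_getD (xs : List Int) : ∀ (s : Int) (j : Nat), j < xs.length →
    (pvPsums s xs).getD j 0 = s + (xs.take (j + 1)).sum := by
  induction xs with
  | nil => intro s j h; simp at h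
  | cons x xs ih =>
    intro s j h
    cases j with
    | zero => simp [pvPsums]
    | succ j =>
      simp only [pvPsums, List.getD_cons_succ, List.take_succ_cons, List.sum_cons]
      rw [ih (s + x) j (by simpa using h)]
      ring

theorem prefixTable_getD (xs : List Int) (j : Nat) (h : j ≤ xs.length) :
    (pvPrefixTable xs).getD j 0 = (xs.take j).sum := by
  rw [prefixTable_eq]
  cases j with
  | zero => simp
  | succ j =>
    simp only [List.getD_cons_succ]
    rw [psums_getD xs 0 j (by omega)]
    simp

-- sum of take (i+1) unfolds one step, with Python's getD-0 convention (exact for all i: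
-- beyond the length both sides add 0)
theorem sum_take_succ_getD (xs : List Int) (i : Nat) :
    (xs.take (i + 1)).sum = (xs.take i).sum + xs.getD i 0 := by
  by_cases h : i < xs.length
  · rw [List.take_add_one, List.sum_append]
    have : xs[i]? = some xs[i] := List.getElem?_eq_getElem h
    simp [this, List.getD]
  · have h1 : xs.take (i + 1) = xs := List.take_of_length_le (by omega)
    have h2 : xs.take i = xs := List.take_of_length_le (by omega)
    have h3 : xs.getD i 0 = 0 := by
      simp [List.getD_eq_getElem?_getD, List.getElem?_eq_none (by omega : xs.length ≤ i)]
    rw [h1, h2, h3, add_zero]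

-- core induction: A's loop from index i equals B's scan from j = i, provided the tables
-- agree with the closed-form balances wherever the scan can still look (hagree needs the
-- prefix up to j to have stayed nonnegative)
theorem goA_eq_scanB (begin0 : Int) (C B : List Int) (pc pb : List Int)
    (hagree : ∀ j : Nat, j < C.length →
      (∀ j' : Nat, j' < j → 0 ≤ begin0 - ((C.take (j' + 1)).sum) + ((B.take j').sum)) →
      pc.getD (j + 1) 0 = (C.take (j + 1)).sum ∧ pb.getD j 0 = (B.take j).sum) :
    ∀ k i, C.length - i = k → i ≤ C.length →
      (∀ j' : Nat, j' < i → 0 ≤ begin0 - ((C.take (j' + 1)).sum) + ((B.take j').sum)) →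
      goA C B i (begin0 - (C.take i).sum + (B.take i).sum) (i : Int) =
        scanB begin0 pc pb C.length i := by
  intro k
  induction k with
  | zero =>
    intro i hk hle _
    rw [goA, scanB]
    have : ¬ i < C.length := by omega
    rw [if_neg this, if_neg this]
    omega
  | succ k ih =>
    intro i hk _ hprev
    have hi : i < C.length := by omega
    obtain ⟨hpc, hpb⟩ := hagree i hi hprev
    rw [goA, scanB, if_pos hi, if_pos hi]
    have hbal : begin0 - (C.take i).sum + (B.take i).sum - C.getD i 0 =
        begin0 - pc.getD (i + 1) 0 + pb.getD i 0 := by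
      rw [hpc, hpb, sum_take_succ_getD C i]; ring
    simp only [hbal]
    by_cases hneg : begin0 - pc.getD (i + 1) 0 + pb.getD i 0 < 0
    · rw [if_pos hneg, if_pos hneg]
    · rw [if_neg hneg, if_neg hneg]
      have hbalA : 0 ≤ begin0 - ((C.take (i + 1)).sum) + ((B.take i).sum) := by
        rw [← hpc, ← hpb]; omega
      have hprev' : ∀ j' : Nat, j' < i + 1 →
          0 ≤ begin0 - ((C.take (j' + 1)).sum) + ((B.take j').sum) := by
        intro j' hj'
        rcases Nat.lt_or_ge j' i with h | h
        · exact hprev j' h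
        · have : j' = i := by omega
          subst this; exact hbalA
      by_cases hlast : i = C.length - 1
      · rw [if_pos hlast]
        have hn : ¬ i + 1 < C.length := by omega
        rw [scanB, if_neg hn]
        omega
      · rw [if_neg hlast]
        have harg : begin0 - (C.take i).sum + (B.take i).sum - C.getD i 0 + B.getD i 0 =
            begin0 - (C.take (i + 1)).sum + (B.take (i + 1)).sum := by
          rw [sum_take_succ_getD C i, sum_take_succ_getD B i]; ring
        rw [← hbal, harg]
        have := ih (i + 1) (by omega) (by omega) hprev'
        push_cast at this ⊢
        exact this

theorem find_max_city_eq (begin : Int) (C B : List Int)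
    (hpre : Pre_find_max_city begin C B) :
    find_max_city begin C B = find_max_city_alt begin C B := by
  unfold find_max_city find_max_city_alt
  set m : Nat := min (C.length - 1) B.length with hm
  have hmB : m ≤ B.length := by omega
  have hagree : ∀ j : Nat, j < C.length →
      (∀ j' : Nat, j' < j → 0 ≤ begin - ((C.take (j' + 1)).sum) + ((B.take j').sum)) →
      (pvPrefixTable C).getD (j + 1) 0 = (C.take (j + 1)).sum ∧
      (pvPrefixTable (B.take m)).getD j 0 = (B.take j).sum := by
    intro j hj hnn
    have hjm : j ≤ m := by
      by_cases h : C.length - 1 ≤ B.length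
      · have : m = C.length - 1 := by rw [hm]; exact Nat.min_eq_left h
        omega
      · have hmB' : m = B.length := by rw [hm]; exact Nat.min_eq_right (by omega)
        rcases hpre with hlen | ⟨j0, hj0, hbal⟩
        · omega
        · by_contra hgt
          have : j0 < j := by omega
          exact absurd (hnn j0 this) (by omega)
    constructor
    · exact prefixTable_getD C (j + 1) (by omega)
    · have hlen : (B.take m).length = m := by
        rw [List.length_take]
        exact Nat.min_eq_left hmB
      rw [prefixTable_getD (B.take m) j (by omega)]
      rw [List.take_take, Nat.min_eq_left hjm]
  have h := goA_eq_scanB begin C B (pvPrefixTable C) (pvPrefixTable (B.take m)) hagree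
      C.length 0 rfl (by omega) (by intro j' h; omega)
  show goA C B 0 begin 0 =
    scanB begin (pvPrefixTable C) (pvPrefixTable (B.take m)) C.length 0
  simpa using h

-- ===== VERDICT (by name: the statement is the Claim_ definition above) =====
theorem find_max_city_spec : Claim_equal_find_max_city := by
  intro begin C B _ hpre
  unfold Spec_find_max_city
  exact find_max_city_eq begin C B hpre
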